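-- pv_equiv track=rewrite | github.com/Gabrielkeppen/state_machine_jutsu | jutsu-recognizer.py | executar_afnd
-- ===== SOURCE A (Python) =====
-- estado_inicial = "q0"
--
-- estados_finais = ["qf1", "qf2", "qf3", "qf4", "qf5", "qf6"]
--
-- transicoes = {
--     ("q0", "cobra"): ["q1"],
--     ("q1", "dragao"): ["q2"],
--
--
--     ("q2", "coelho"): ["q3"],
--     ("q3", "tigre"): ["qf1"],
--     ("q3", "cachorro"): ["qf2"],
--
--
--     ("q2", "tigre"): ["qf3"],
--
--
--     ("q0", "cavalo"): ["q10"],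
--     ("q10", "dragao"): ["q11"],
--     ("q11", "boi"): ["q12"],
--     ("q12", "tigre"): ["qf4"],
--
--
--     ("q0", "boi"): ["q20"],
--     ("q20", "cobra"): ["q21"],
--
--     ("q21", "cachorro"): ["qf5"],
--     ("q21", "dragao"): ["q22"],
--     ("q22", "rato"): ["qf6"],
-- }
--
-- jutsu_por_estado = {
--     "qf1": "Katon: Goukakyuu",
--     "qf2": "Katon: Housenka",
--     "qf3": "Raiton: Chidori",
--     "qf4": "Suiton: Suiryuudan",
--     "qf5": "Doton: Doryuheki",
--     "qf6": "Doton: Doryuudan"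
-- }
--
-- def executar_afnd(entrada):
--     estados_atuais = {estado_inicial}
--
--     for simbolo in entrada:
--         novos_estados = set()
--
--         for estado in estados_atuais:
--             chave = (estado, simbolo)
--
--             if chave in transicoes:
--                 novos_estados.update(transicoes[chave])
--
--         estados_atuais = novos_estados
--
--         if not estados_atuais:
--             return "Sequência inválida"
--
--     # Verifica se terminou em estado final
--     for estado in estados_atuais:
--         if estado in estados_finais:
--             return f"Jutsu reconhecido: {jutsu_por_estado[estado]}"
--     return "Sequência incompleta"
-- ===== SOURCE B (Python) =====
-- # The NFA's language is finite: exactly six accepted sequences. B compares the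
-- # input against that table: exact match -> recognized, proper prefix -> incomplete,
-- # otherwise invalid. No state machine is simulated at all.
-- _JUTSU_SEQS = [
--     (["cobra", "dragao", "coelho", "tigre"], "Katon: Goukakyuu"),
--     (["cobra", "dragao", "coelho", "cachorro"], "Katon: Housenka"),
--     (["cobra", "dragao", "tigre"], "Raiton: Chidori"),
--     (["cavalo", "dragao", "boi", "tigre"], "Suiton: Suiryuudan"),
--     (["boi", "cobra", "cachorro"], "Doton: Doryuheki"),
--     (["boi", "cobra", "dragao", "rato"], "Doton: Doryuudan"),
-- ]
--
--
-- def executar_afnd(entrada):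
--     seq = list(entrada)
--     for s, nome in _JUTSU_SEQS:
--         if seq == s:
--             return "Jutsu reconhecido: " + nome
--     for s, _ in _JUTSU_SEQS:
--         if seq == s[:len(seq)]:
--             return "Sequência incompleta"
--     return "Sequência inválida"
-- ===== Notes on version B (the rewrite author's own statement) =====
-- stated objective: alternative
-- what changed: B does not simulate the automaton at all: since the NFA's language is finite (six accepted sequences), B classifies the input against a table of the six sequences - exact match gives the recognized jutsu, proper prefix gives 'Sequência incompleta', anything else 'Sequência inválida'.
import Mathlib
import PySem

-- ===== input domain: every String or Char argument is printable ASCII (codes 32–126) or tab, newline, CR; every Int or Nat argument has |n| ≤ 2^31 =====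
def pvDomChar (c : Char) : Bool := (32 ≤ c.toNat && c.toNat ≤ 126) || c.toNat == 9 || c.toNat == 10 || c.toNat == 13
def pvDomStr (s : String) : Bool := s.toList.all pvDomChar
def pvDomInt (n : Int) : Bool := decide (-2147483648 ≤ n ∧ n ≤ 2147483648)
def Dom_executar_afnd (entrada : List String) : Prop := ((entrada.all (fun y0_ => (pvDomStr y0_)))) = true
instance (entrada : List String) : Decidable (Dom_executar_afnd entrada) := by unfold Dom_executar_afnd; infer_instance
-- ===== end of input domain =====

-- B drops the NFA simulation entirely: the automaton's language is finite (six
-- sequences), so B classifies the input against a table of the accepted sequences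
-- (exact match → recognized, proper prefix → incomplete, else invalid); objective: alternative.

-- ===== PORT A =====
-- module-level constants of A
def pvEstadoInicial : String := "q0"

def pvEstadosFinais : List String := ["qf1", "qf2", "qf3", "qf4", "qf5", "qf6"]

def pvTransicoes : PySem.Dict (String × String) (List String) := PySem.Dict.mk [
  (("q0", "cobra"), ["q1"]),
  (("q1", "dragao"), ["q2"]),
  (("q2", "coelho"), ["q3"]),
  (("q3", "tigre"), ["qf1"]),
  (("q3", "cachorro"), ["qf2"]),
  (("q2", "tigre"), ["qf3"]),
  (("q0", "cavalo"), ["q10"]),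
  (("q10", "dragao"), ["q11"]),
  (("q11", "boi"), ["q12"]),
  (("q12", "tigre"), ["qf4"]),
  (("q0", "boi"), ["q20"]),
  (("q20", "cobra"), ["q21"]),
  (("q21", "cachorro"), ["qf5"]),
  (("q21", "dragao"), ["q22"]),
  (("q22", "rato"), ["qf6"])]

def pvJutsuPorEstado : PySem.Dict String String := PySem.Dict.mk [
  ("qf1", "Katon: Goukakyuu"),
  ("qf2", "Katon: Housenka"),
  ("qf3", "Raiton: Chidori"),
  ("qf4", "Suiton: Suiryuudan"),
  ("qf5", "Doton: Doryuheki"),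
  ("qf6", "Doton: Doryuudan")]

-- A's trailing loop 'for estado in estados_atuais: if estado in estados_finais: return …'.
-- (jutsu_por_estado[estado] cannot KeyError: the guard ensures estado is final and every
-- final state is a key of the dict, so getD's default is never used.)
def pvFinalLoopA : List String → String
  | [] => "Sequência incompleta"
  | estado :: rest =>
      if pvEstadosFinais.contains estado
      then "Jutsu reconhecido: " ++ pvJutsuPorEstado.getD estado ""
      else pvFinalLoopA rest

-- A's main 'for simbolo in entrada' loop, frontier set carried along.
-- (transicoes[chave] is guarded by 'chave in transicoes', so getD's default is never used.)
def pvLoopA : List String → PySem.Set String → String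
  | [], estados_atuais => pvFinalLoopA estados_atuais
  | simbolo :: rest, estados_atuais =>
      let novos_estados : PySem.Set String :=
        estados_atuais.foldl (fun acc estado =>
          if pvTransicoes.contains (estado, simbolo)
          then PySem.Set.update acc (pvTransicoes.getD (estado, simbolo) [])
          else acc) PySem.Set.empty
      if novos_estados.isEmpty then "Sequência inválida" else pvLoopA rest novos_estados

def executar_afnd (entrada : List String) : String :=
  pvLoopA entrada (PySem.Set.ofList [pvEstadoInicial])

-- ===== PORT B =====
-- Source B's table of the six accepted sequences with their jutsus
def pvJutsuSeqs : List (List String × String) := [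
  (["cobra", "dragao", "coelho", "tigre"], "Katon: Goukakyuu"),
  (["cobra", "dragao", "coelho", "cachorro"], "Katon: Housenka"),
  (["cobra", "dragao", "tigre"], "Raiton: Chidori"),
  (["cavalo", "dragao", "boi", "tigre"], "Suiton: Suiryuudan"),
  (["boi", "cobra", "cachorro"], "Doton: Doryuheki"),
  (["boi", "cobra", "dragao", "rato"], "Doton: Doryuudan")]

-- Source B's first loop: exact match against the table
def pvFindExact : List (List String × String) → List String → Option String
  | [], _ => none
  | (s, nome) :: rest, seq => if seq = s then some nome else pvFindExact rest seq

-- Source B's second loop: 'seq == s[:len(seq)]' (seq is a prefix of some accepted sequence)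
def pvIsPrefix : List (List String × String) → List String → Bool
  | [], _ => false
  | (s, _) :: rest, seq => if seq = s.take seq.length then true else pvIsPrefix rest seq

def executar_afnd_alt (entrada : List String) : String :=
  match pvFindExact pvJutsuSeqs entrada with
  | some nome => "Jutsu reconhecido: " ++ nome
  | none =>
      if pvIsPrefix pvJutsuSeqs entrada then "Sequência incompleta" else "Sequência inválida"

-- ===== PRECONDITION & SPEC =====
def Spec_executar_afnd (entrada : List String) (out : String) : Prop := out = executar_afnd_alt entrada
instance (entrada : List String) (out : String) : Decidable (Spec_executar_afnd entrada out) := by unfold Spec_executar_afnd; infer_instance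

-- ===== CLAIM (what is proved, stated in full; the proofs are below) =====
def Claim_equal_executar_afnd : Prop := ∀ (entrada : List String), Dom_executar_afnd entrada → Spec_executar_afnd entrada (executar_afnd entrada)

-- ===== LEMMAS AND PROOFS =====

-- proof-side helper: the deterministic scalar run of the automaton
def pvRun : String → List String → String
  | estado, [] =>
      if pvEstadosFinais.contains estado
      then "Jutsu reconhecido: " ++ pvJutsuPorEstado.getD estado ""
      else "Sequência incompleta"
  | estado, simbolo :: rest =>
      match pvTransicoes.get? (estado, simbolo) with
      | none => "Sequência inválida"
      | some destino => pvRun (destino.headD "") rest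

-- every value stored in the transition dict is a one-element list
lemma pvTrans_singleton (k : String × String) (l : List String)
    (h : pvTransicoes.get? k = some l) : ∃ q, l = [q] := by
  simp only [pvTransicoes, PySem.Dict.get?] at h
  rw [Option.map_eq_some_iff] at h
  obtain ⟨p, hp, rfl⟩ := h
  have hm := List.mem_of_find?_eq_some hp
  fin_cases hm <;> exact ⟨_, rfl⟩

-- one step of A's loop from a one-element frontier
lemma pvStepA (e simbolo : String) :
    ([e] : PySem.Set String).foldl (fun acc estado =>
        if pvTransicoes.contains (estado, simbolo)
        then PySem.Set.update acc (pvTransicoes.getD (estado, simbolo) [])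
        else acc) PySem.Set.empty
      = match pvTransicoes.get? (e, simbolo) with
        | none => []
        | some l => PySem.Set.ofList l := by
  simp only [List.foldl]
  rw [PySem.Dict.contains_eq_isSome_get?]
  cases h : pvTransicoes.get? (e, simbolo) with
  | none => rfl
  | some l =>
      rw [PySem.Dict.getD_of_get?_eq_some _ _ h]
      rfl

-- A's loop on a one-element frontier is the scalar run
lemma pvLoopA_eq_run (resto : List String) (e : String) :
    pvLoopA resto [e] = pvRun e resto := by
  induction resto generalizing e with
  | nil => simp [pvLoopA, pvRun, pvFinalLoopA]
  | cons simbolo rest ih =>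
      rw [pvLoopA, pvRun]
      rw [pvStepA e simbolo]
      cases h : pvTransicoes.get? (e, simbolo) with
      | none => rfl
      | some l =>
          obtain ⟨q, rfl⟩ := pvTrans_singleton _ _ h
          simpa [PySem.Set.ofList, PySem.Set.add, PySem.Set.empty] using ih q

-- proof-side: the 16 reachable states
def pvStates : List String :=
  ["q0", "q1", "q2", "q3", "q10", "q11", "q12", "q20", "q21", "q22",
   "qf1", "qf2", "qf3", "qf4", "qf5", "qf6"]

-- proof-side: for each reachable state, the accepted suffixes with their jutsus
def pvAcc (q : String) : List (List String × String) :=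
  if q = "q0" then pvJutsuSeqs
  else if q = "q1" then [(["dragao", "coelho", "tigre"], "Katon: Goukakyuu"),
    (["dragao", "coelho", "cachorro"], "Katon: Housenka"), (["dragao", "tigre"], "Raiton: Chidori")]
  else if q = "q2" then [(["coelho", "tigre"], "Katon: Goukakyuu"),
    (["coelho", "cachorro"], "Katon: Housenka"), (["tigre"], "Raiton: Chidori")]
  else if q = "q3" then [(["tigre"], "Katon: Goukakyuu"), (["cachorro"], "Katon: Housenka")]
  else if q = "q10" then [(["dragao", "boi", "tigre"], "Suiton: Suiryuudan")]
  else if q = "q11" then [(["boi", "tigre"], "Suiton: Suiryuudan")]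
  else if q = "q12" then [(["tigre"], "Suiton: Suiryuudan")]
  else if q = "q20" then [(["cobra", "cachorro"], "Doton: Doryuheki"),
    (["cobra", "dragao", "rato"], "Doton: Doryuudan")]
  else if q = "q21" then [(["cachorro"], "Doton: Doryuheki"), (["dragao", "rato"], "Doton: Doryuudan")]
  else if q = "q22" then [(["rato"], "Doton: Doryuudan")]
  else if q = "qf1" then [([], "Katon: Goukakyuu")]
  else if q = "qf2" then [([], "Katon: Housenka")]
  else if q = "qf3" then [([], "Raiton: Chidori")]
  else if q = "qf4" then [([], "Suiton: Suiryuudan")]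
  else if q = "qf5" then [([], "Doton: Doryuheki")]
  else if q = "qf6" then [([], "Doton: Doryuudan")]
  else []

-- proof-side: B's classification, with the table as a parameter
def pvClassify (t : List (List String × String)) (seq : List String) : String :=
  match pvFindExact t seq with
  | some nome => "Jutsu reconhecido: " ++ nome
  | none => if pvIsPrefix t seq then "Sequência incompleta" else "Sequência inválida"

-- for every reachable state, the scalar run is B's classification of the remaining
-- input against that state's accepted-suffix table (finite case analysis)
lemma pvRun_classify : ∀ (resto : List String) (q : String), q ∈ pvStates →
    pvRun q resto = pvClassify (pvAcc q) resto := by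
  intro resto
  induction resto with
  | nil => intro q hq; fin_cases hq <;> rfl
  | cons s rest ih =>
      intro q hq
      fin_cases hq
      · -- q = "q0"
        by_cases h0 : s = "cobra"
        · subst h0
          rw [show pvRun "q0" ("cobra" :: rest) = pvRun "q1" rest from rfl,
              ih "q1" (by simp [pvStates])]
          simp [pvClassify, pvAcc, pvFindExact, pvIsPrefix, pvJutsuSeqs, List.take_succ_cons]
        · 
          by_cases h1 : s = "cavalo"
          · subst h1
            rw [show pvRun "q0" ("cavalo" :: rest) = pvRun "q10" rest from rfl,
                ih "q10" (by simp [pvStates])]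
            simp [pvClassify, pvAcc, pvFindExact, pvIsPrefix, pvJutsuSeqs, List.take_succ_cons]
          · 
            by_cases h2 : s = "boi"
            · subst h2
              rw [show pvRun "q0" ("boi" :: rest) = pvRun "q20" rest from rfl,
                  ih "q20" (by simp [pvStates])]
              simp [pvClassify, pvAcc, pvFindExact, pvIsPrefix, pvJutsuSeqs, List.take_succ_cons]
            · 
              have hget : pvTransicoes.get? ("q0", s) = none := by
                simp [pvTransicoes, PySem.Dict.get?_mk_cons, PySem.Dict.get?, Ne.symm h0, Ne.symm h1, Ne.symm h2]
              rw [show pvRun "q0" (s :: rest) = (match pvTransicoes.get? ("q0", s) with | none => "Sequência inválida" | some destino => pvRun (destino.headD "") rest) from rfl, hget]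
              simp [pvClassify, pvAcc, pvFindExact, pvIsPrefix, pvJutsuSeqs, List.take_succ_cons, h0, h1, h2]
      · -- q = "q1"
        by_cases h0 : s = "dragao"
        · subst h0
          rw [show pvRun "q1" ("dragao" :: rest) = pvRun "q2" rest from rfl,
              ih "q2" (by simp [pvStates])]
          simp [pvClassify, pvAcc, pvFindExact, pvIsPrefix, pvJutsuSeqs, List.take_succ_cons]
        · 
          have hget : pvTransicoes.get? ("q1", s) = none := by
            simp [pvTransicoes, PySem.Dict.get?_mk_cons, PySem.Dict.get?, Ne.symm h0]
          rw [show pvRun "q1" (s :: rest) = (match pvTransicoes.get? ("q1", s) with | none => "Sequência inválida" | some destino => pvRun (destino.headD "") rest) from rfl, hget]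
          simp [pvClassify, pvAcc, pvFindExact, pvIsPrefix, pvJutsuSeqs, List.take_succ_cons, h0]
      · -- q = "q2"
        by_cases h0 : s = "coelho"
        · subst h0
          rw [show pvRun "q2" ("coelho" :: rest) = pvRun "q3" rest from rfl,
              ih "q3" (by simp [pvStates])]
          simp [pvClassify, pvAcc, pvFindExact, pvIsPrefix, pvJutsuSeqs, List.take_succ_cons]
        · 
          by_cases h1 : s = "tigre"
          · subst h1
            rw [show pvRun "q2" ("tigre" :: rest) = pvRun "qf3" rest from rfl,
                ih "qf3" (by simp [pvStates])]
            simp [pvClassify, pvAcc, pvFindExact, pvIsPrefix, pvJutsuSeqs, List.take_succ_cons]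
          · 
            have hget : pvTransicoes.get? ("q2", s) = none := by
              simp [pvTransicoes, PySem.Dict.get?_mk_cons, PySem.Dict.get?, Ne.symm h0, Ne.symm h1]
            rw [show pvRun "q2" (s :: rest) = (match pvTransicoes.get? ("q2", s) with | none => "Sequência inválida" | some destino => pvRun (destino.headD "") rest) from rfl, hget]
            simp [pvClassify, pvAcc, pvFindExact, pvIsPrefix, pvJutsuSeqs, List.take_succ_cons, h0, h1]
      · -- q = "q3"
        by_cases h0 : s = "tigre"
        · subst h0
          rw [show pvRun "q3" ("tigre" :: rest) = pvRun "qf1" rest from rfl,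
              ih "qf1" (by simp [pvStates])]
          simp [pvClassify, pvAcc, pvFindExact, pvIsPrefix, pvJutsuSeqs, List.take_succ_cons]
        · 
          by_cases h1 : s = "cachorro"
          · subst h1
            rw [show pvRun "q3" ("cachorro" :: rest) = pvRun "qf2" rest from rfl,
                ih "qf2" (by simp [pvStates])]
            simp [pvClassify, pvAcc, pvFindExact, pvIsPrefix, pvJutsuSeqs, List.take_succ_cons]
          · 
            have hget : pvTransicoes.get? ("q3", s) = none := by
              simp [pvTransicoes, PySem.Dict.get?_mk_cons, PySem.Dict.get?, Ne.symm h0, Ne.symm h1]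
            rw [show pvRun "q3" (s :: rest) = (match pvTransicoes.get? ("q3", s) with | none => "Sequência inválida" | some destino => pvRun (destino.headD "") rest) from rfl, hget]
            simp [pvClassify, pvAcc, pvFindExact, pvIsPrefix, pvJutsuSeqs, List.take_succ_cons, h0, h1]
      · -- q = "q10"
        by_cases h0 : s = "dragao"
        · subst h0
          rw [show pvRun "q10" ("dragao" :: rest) = pvRun "q11" rest from rfl,
              ih "q11" (by simp [pvStates])]
          simp [pvClassify, pvAcc, pvFindExact, pvIsPrefix, pvJutsuSeqs, List.take_succ_cons]
        · 
          have hget : pvTransicoes.get? ("q10", s) = none := by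
            simp [pvTransicoes, PySem.Dict.get?_mk_cons, PySem.Dict.get?, Ne.symm h0]
          rw [show pvRun "q10" (s :: rest) = (match pvTransicoes.get? ("q10", s) with | none => "Sequência inválida" | some destino => pvRun (destino.headD "") rest) from rfl, hget]
          simp [pvClassify, pvAcc, pvFindExact, pvIsPrefix, pvJutsuSeqs, List.take_succ_cons, h0]
      · -- q = "q11"
        by_cases h0 : s = "boi"
        · subst h0
          rw [show pvRun "q11" ("boi" :: rest) = pvRun "q12" rest from rfl,
              ih "q12" (by simp [pvStates])]
          simp [pvClassify, pvAcc, pvFindExact, pvIsPrefix, pvJutsuSeqs, List.take_succ_cons]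
        · 
          have hget : pvTransicoes.get? ("q11", s) = none := by
            simp [pvTransicoes, PySem.Dict.get?_mk_cons, PySem.Dict.get?, Ne.symm h0]
          rw [show pvRun "q11" (s :: rest) = (match pvTransicoes.get? ("q11", s) with | none => "Sequência inválida" | some destino => pvRun (destino.headD "") rest) from rfl, hget]
          simp [pvClassify, pvAcc, pvFindExact, pvIsPrefix, pvJutsuSeqs, List.take_succ_cons, h0]
      · -- q = "q12"
        by_cases h0 : s = "tigre"
        · subst h0
          rw [show pvRun "q12" ("tigre" :: rest) = pvRun "qf4" rest from rfl,
              ih "qf4" (by simp [pvStates])]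
          simp [pvClassify, pvAcc, pvFindExact, pvIsPrefix, pvJutsuSeqs, List.take_succ_cons]
        · 
          have hget : pvTransicoes.get? ("q12", s) = none := by
            simp [pvTransicoes, PySem.Dict.get?_mk_cons, PySem.Dict.get?, Ne.symm h0]
          rw [show pvRun "q12" (s :: rest) = (match pvTransicoes.get? ("q12", s) with | none => "Sequência inválida" | some destino => pvRun (destino.headD "") rest) from rfl, hget]
          simp [pvClassify, pvAcc, pvFindExact, pvIsPrefix, pvJutsuSeqs, List.take_succ_cons, h0]
      · -- q = "q20"
        by_cases h0 : s = "cobra"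
        · subst h0
          rw [show pvRun "q20" ("cobra" :: rest) = pvRun "q21" rest from rfl,
              ih "q21" (by simp [pvStates])]
          simp [pvClassify, pvAcc, pvFindExact, pvIsPrefix, pvJutsuSeqs, List.take_succ_cons]
        · 
          have hget : pvTransicoes.get? ("q20", s) = none := by
            simp [pvTransicoes, PySem.Dict.get?_mk_cons, PySem.Dict.get?, Ne.symm h0]
          rw [show pvRun "q20" (s :: rest) = (match pvTransicoes.get? ("q20", s) with | none => "Sequência inválida" | some destino => pvRun (destino.headD "") rest) from rfl, hget]
          simp [pvClassify, pvAcc, pvFindExact, pvIsPrefix, pvJutsuSeqs, List.take_succ_cons, h0]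
      · -- q = "q21"
        by_cases h0 : s = "cachorro"
        · subst h0
          rw [show pvRun "q21" ("cachorro" :: rest) = pvRun "qf5" rest from rfl,
              ih "qf5" (by simp [pvStates])]
          simp [pvClassify, pvAcc, pvFindExact, pvIsPrefix, pvJutsuSeqs, List.take_succ_cons]
        · 
          by_cases h1 : s = "dragao"
          · subst h1
            rw [show pvRun "q21" ("dragao" :: rest) = pvRun "q22" rest from rfl,
                ih "q22" (by simp [pvStates])]
            simp [pvClassify, pvAcc, pvFindExact, pvIsPrefix, pvJutsuSeqs, List.take_succ_cons]
          · 
            have hget : pvTransicoes.get? ("q21", s) = none := by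
              simp [pvTransicoes, PySem.Dict.get?_mk_cons, PySem.Dict.get?, Ne.symm h0, Ne.symm h1]
            rw [show pvRun "q21" (s :: rest) = (match pvTransicoes.get? ("q21", s) with | none => "Sequência inválida" | some destino => pvRun (destino.headD "") rest) from rfl, hget]
            simp [pvClassify, pvAcc, pvFindExact, pvIsPrefix, pvJutsuSeqs, List.take_succ_cons, h0, h1]
      · -- q = "q22"
        by_cases h0 : s = "rato"
        · subst h0
          rw [show pvRun "q22" ("rato" :: rest) = pvRun "qf6" rest from rfl,
              ih "qf6" (by simp [pvStates])]
          simp [pvClassify, pvAcc, pvFindExact, pvIsPrefix, pvJutsuSeqs, List.take_succ_cons]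
        · 
          have hget : pvTransicoes.get? ("q22", s) = none := by
            simp [pvTransicoes, PySem.Dict.get?_mk_cons, PySem.Dict.get?, Ne.symm h0]
          rw [show pvRun "q22" (s :: rest) = (match pvTransicoes.get? ("q22", s) with | none => "Sequência inválida" | some destino => pvRun (destino.headD "") rest) from rfl, hget]
          simp [pvClassify, pvAcc, pvFindExact, pvIsPrefix, pvJutsuSeqs, List.take_succ_cons, h0]
      · -- q = "qf1"
          have hget : pvTransicoes.get? ("qf1", s) = none := by
            simp [pvTransicoes, PySem.Dict.get?_mk_cons, PySem.Dict.get?]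
          rw [show pvRun "qf1" (s :: rest) = (match pvTransicoes.get? ("qf1", s) with | none => "Sequência inválida" | some destino => pvRun (destino.headD "") rest) from rfl, hget]
          simp [pvClassify, pvAcc, pvFindExact, pvIsPrefix, pvJutsuSeqs, List.take_succ_cons]
      · -- q = "qf2"
          have hget : pvTransicoes.get? ("qf2", s) = none := by
            simp [pvTransicoes, PySem.Dict.get?_mk_cons, PySem.Dict.get?]
          rw [show pvRun "qf2" (s :: rest) = (match pvTransicoes.get? ("qf2", s) with | none => "Sequência inválida" | some destino => pvRun (destino.headD "") rest) from rfl, hget]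
          simp [pvClassify, pvAcc, pvFindExact, pvIsPrefix, pvJutsuSeqs, List.take_succ_cons]
      · -- q = "qf3"
          have hget : pvTransicoes.get? ("qf3", s) = none := by
            simp [pvTransicoes, PySem.Dict.get?_mk_cons, PySem.Dict.get?]
          rw [show pvRun "qf3" (s :: rest) = (match pvTransicoes.get? ("qf3", s) with | none => "Sequência inválida" | some destino => pvRun (destino.headD "") rest) from rfl, hget]
          simp [pvClassify, pvAcc, pvFindExact, pvIsPrefix, pvJutsuSeqs, List.take_succ_cons]
      · -- q = "qf4"
          have hget : pvTransicoes.get? ("qf4", s) = none := by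
            simp [pvTransicoes, PySem.Dict.get?_mk_cons, PySem.Dict.get?]
          rw [show pvRun "qf4" (s :: rest) = (match pvTransicoes.get? ("qf4", s) with | none => "Sequência inválida" | some destino => pvRun (destino.headD "") rest) from rfl, hget]
          simp [pvClassify, pvAcc, pvFindExact, pvIsPrefix, pvJutsuSeqs, List.take_succ_cons]
      · -- q = "qf5"
          have hget : pvTransicoes.get? ("qf5", s) = none := by
            simp [pvTransicoes, PySem.Dict.get?_mk_cons, PySem.Dict.get?]
          rw [show pvRun "qf5" (s :: rest) = (match pvTransicoes.get? ("qf5", s) with | none => "Sequência inválida" | some destino => pvRun (destino.headD "") rest) from rfl, hget]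
          simp [pvClassify, pvAcc, pvFindExact, pvIsPrefix, pvJutsuSeqs, List.take_succ_cons]
      · -- q = "qf6"
          have hget : pvTransicoes.get? ("qf6", s) = none := by
            simp [pvTransicoes, PySem.Dict.get?_mk_cons, PySem.Dict.get?]
          rw [show pvRun "qf6" (s :: rest) = (match pvTransicoes.get? ("qf6", s) with | none => "Sequência inválida" | some destino => pvRun (destino.headD "") rest) from rfl, hget]
          simp [pvClassify, pvAcc, pvFindExact, pvIsPrefix, pvJutsuSeqs, List.take_succ_cons]

-- the scalar run from q0 is B's table classification
lemma pvRun_eq_alt (entrada : List String) :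
    pvRun "q0" entrada = executar_afnd_alt entrada := by
  have h := pvRun_classify entrada "q0" (by simp [pvStates])
  simpa [pvClassify, pvAcc, executar_afnd_alt] using h

-- ===== VERDICT (by name: the statement is the Claim_ definition above) =====
theorem executar_afnd_spec : Claim_equal_executar_afnd := by
  intro entrada _
  show executar_afnd entrada = executar_afnd_alt entrada
  rw [executar_afnd]
  have h0 : (PySem.Set.ofList [pvEstadoInicial]) = (["q0"] : PySem.Set String) := by decide
  rw [h0, pvLoopA_eq_run, pvRun_eq_alt]
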